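-- pv_equiv track=rewrite | github.com/Sam9682/tatool-xlsx | app_classes/excel_graphs_data.py | get_aggregated_global_category_count_dict
-- ===== SOURCE A (Python) =====
-- def get_aggregated_global_category_count_dict(file_in_list):
--     aggregated_global_category_count_dict = {}
--     for line in file_in_list:
--         category = line.split(",")[3]
--         status_check = line.split(",")[4]
--         if aggregated_global_category_count_dict.get(category) == None:
--             aggregated_global_category_count_dict[category] = {}
--         if aggregated_global_category_count_dict.get(category, {}).get(status_check) == None:
--             aggregated_global_category_count_dict[category][status_check] = 1
--         else:
--             a = aggregated_global_category_count_dict.get(category, {}).get(status_check)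
--             aggregated_global_category_count_dict[category][status_check] = a + 1
--     return aggregated_global_category_count_dict
-- ===== SOURCE B (Python) =====
-- def get_aggregated_global_category_count_dict(file_in_list):
--     # one flat tally keyed by (category, status), then regroup into nested dicts
--     counts = {}
--     for line in file_in_list:
--         fields = line.split(",")
--         key = (fields[3], fields[4])
--         counts[key] = counts.get(key, 0) + 1
--     result = {}
--     for (category, status), n in counts.items():
--         if category not in result:
--             result[category] = {}
--         result[category][status] = n
--     return result
-- ===== Notes on version B (the rewrite author's own statement) =====
-- stated objective: alternative
-- what changed: Replaces A's incremental nested dict-of-dicts updates with a single flat counter keyed by the (category, status) pair followed by a regrouping pass that builds the nested result from the counter's items.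
import Mathlib
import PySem

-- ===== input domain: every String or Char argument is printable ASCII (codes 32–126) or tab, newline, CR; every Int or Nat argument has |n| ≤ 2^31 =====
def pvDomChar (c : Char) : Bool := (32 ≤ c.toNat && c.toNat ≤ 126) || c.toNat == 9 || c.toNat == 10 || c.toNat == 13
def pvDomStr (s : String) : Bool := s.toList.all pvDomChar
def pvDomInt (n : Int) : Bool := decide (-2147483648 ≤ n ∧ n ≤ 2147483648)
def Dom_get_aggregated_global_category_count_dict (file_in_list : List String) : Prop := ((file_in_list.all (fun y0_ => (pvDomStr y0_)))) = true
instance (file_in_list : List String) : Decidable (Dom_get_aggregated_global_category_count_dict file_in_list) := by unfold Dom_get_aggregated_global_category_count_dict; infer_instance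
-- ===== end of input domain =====

-- B replaces A's incremental nested dict-of-dicts updates with a flat (category, status) counter
-- plus a regrouping pass; same cost, alternative structure.

-- ===== PORT A =====
-- line.split(",")[i] is ported as PySem.List.pyGetD … i "" : within Pre_ the index is in range,
-- so the default is never read (Python raises IndexError outside Pre_).
def get_aggregated_global_category_count_dict (file_in_list : List String) : List (String × List (String × Int)) :=
  let d := file_in_list.foldl (fun d line =>
    let category := PySem.List.pyGetD ((PySem.Str.split? line ",").getD []) 3 ""
    let status_check := PySem.List.pyGetD ((PySem.Str.split? line ",").getD []) 4 ""
    let d := if d.get? category = none then d.insert category PySem.Dict.empty else d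
    if (d.getD category PySem.Dict.empty).get? status_check = none then
      d.insert category ((d.getD category PySem.Dict.empty).insert status_check 1)
    else
      let a := ((d.getD category PySem.Dict.empty).get? status_check).getD 0
      d.insert category ((d.getD category PySem.Dict.empty).insert status_check (a + 1)))
    PySem.Dict.empty
  d.items.map (fun p => (p.1, p.2.items))

-- ===== PORT B =====
def get_aggregated_global_category_count_dict_alt (file_in_list : List String) : List (String × List (String × Int)) :=
  let counts : PySem.Dict (String × String) Int := file_in_list.foldl (fun c line =>
    let fields := (PySem.Str.split? line ",").getD []
    let key := (PySem.List.pyGetD fields 3 "", PySem.List.pyGetD fields 4 "")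
    c.insert key (c.getD key 0 + 1)) PySem.Dict.empty
  let result : PySem.Dict String (PySem.Dict String Int) := counts.items.foldl (fun r kv =>
    let r := if r.contains kv.1.1 then r else r.insert kv.1.1 PySem.Dict.empty
    r.insert kv.1.1 ((r.getD kv.1.1 PySem.Dict.empty).insert kv.1.2 kv.2)) PySem.Dict.empty
  result.items.map (fun p => (p.1, p.2.items))

-- ===== PRECONDITION & SPEC =====
-- Pre_ excludes exactly the lines with fewer than five comma-separated fields, on which
-- Python A raises IndexError at line.split(",")[3] or [4].
def Pre_get_aggregated_global_category_count_dict (file_in_list : List String) : Prop :=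
  ∀ line ∈ file_in_list, 5 ≤ ((PySem.Str.split? line ",").getD []).length
instance (file_in_list : List String) : Decidable (Pre_get_aggregated_global_category_count_dict file_in_list) := by unfold Pre_get_aggregated_global_category_count_dict; infer_instance
def pvWitness_get_aggregated_global_category_count_dict : List String :=
  ["10,ab,cd,net,OK", "11,ab,cd,net,KO", "12,ab,cd,disk,OK"]
def Spec_get_aggregated_global_category_count_dict (file_in_list : List String) (out : List (String × List (String × Int))) : Prop := out = get_aggregated_global_category_count_dict_alt file_in_list
instance (file_in_list : List String) (out : List (String × List (String × Int))) : Decidable (Spec_get_aggregated_global_category_count_dict file_in_list out) := by unfold Spec_get_aggregated_global_category_count_dict; infer_instance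

-- ===== CLAIM (what is proved, stated in full; the proofs are below) =====
def Claim_equal_get_aggregated_global_category_count_dict : Prop := ∀ (file_in_list : List String), Dom_get_aggregated_global_category_count_dict file_in_list → Pre_get_aggregated_global_category_count_dict file_in_list → Spec_get_aggregated_global_category_count_dict file_in_list (get_aggregated_global_category_count_dict file_in_list)

-- ===== LEMMAS AND PROOFS =====

-- the (category, status) pair a line contributes
def pvPairOf (line : String) : String × String :=
  (PySem.List.pyGetD ((PySem.Str.split? line ",").getD []) 3 "",
   PySem.List.pyGetD ((PySem.Str.split? line ",").getD []) 4 "")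

lemma pvDict_ext {κ ν : Type} (a b : PySem.Dict κ ν) (h : a.items = b.items) : a = b := by
  cases a; cases b; cases h; rfl

lemma pv_insert_insert_self {κ ν : Type} [BEq κ] [LawfulBEq κ] (d : PySem.Dict κ ν) (k : κ) (v w : ν) :
    (d.insert k v).insert k w = d.insert k w := by
  apply pvDict_ext
  by_cases h : d.contains k = true
  · rw [PySem.Dict.items_insert_of_contains _ w (PySem.Dict.contains_insert_self d k v),
        PySem.Dict.items_insert_of_contains _ v h,
        PySem.Dict.items_insert_of_contains _ w h, List.map_map]
    apply List.map_congr_left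
    intro p _
    by_cases hp : (p.1 == k) = true <;> simp [hp]
  · have h' : d.contains k = false := by simpa using h
    rw [PySem.Dict.items_insert_of_contains _ w (PySem.Dict.contains_insert_self d k v),
        PySem.Dict.items_insert_of_not_contains _ v h',
        PySem.Dict.items_insert_of_not_contains _ w h', List.map_append]
    have hall : ∀ p ∈ d.items, (p.1 == k) = false := by
      simpa [PySem.Dict.contains, List.any_eq_false] using h'
    have : List.map (fun p => if (p.1 == k) = true then (k, w) else p) d.items = d.items := by
      calc List.map (fun p => if (p.1 == k) = true then (k, w) else p) d.items
          = List.map id d.items := List.map_congr_left (fun p hp => by simp [hall p hp])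
        _ = d.items := List.map_id _
    simp [this]

lemma pv_insert_comm {κ ν : Type} [BEq κ] [LawfulBEq κ] (d : PySem.Dict κ ν) {k k' : κ} (v w : ν)
    (hk : d.contains k = true) (hne : k ≠ k') :
    (d.insert k v).insert k' w = (d.insert k' w).insert k v := by
  have hkk' : (k == k') = false := by simp [hne]
  have hk'k : (k' == k) = false := by simp [Ne.symm hne]
  have hck : (d.insert k' w).contains k = true := by
    rw [PySem.Dict.contains_insert]; simp [hk]
  apply pvDict_ext
  by_cases hk' : d.contains k' = true
  · have hck' : (d.insert k v).contains k' = true := by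
      rw [PySem.Dict.contains_insert]; simp [hk']
    rw [PySem.Dict.items_insert_of_contains _ w hck',
        PySem.Dict.items_insert_of_contains _ v hk,
        PySem.Dict.items_insert_of_contains _ v hck,
        PySem.Dict.items_insert_of_contains _ w hk',
        List.map_map, List.map_map]
    apply List.map_congr_left
    intro p _
    by_cases hp : (p.1 == k) = true
    · have hp' : (p.1 == k') = false := by
        have : p.1 = k := by simpa using hp
        simp [this, hne]
      simp [Function.comp, hp, hp', hkk']
    · by_cases hq : (p.1 == k') = true <;>
        simp [Function.comp, hp, hq, hk'k]
  · have hk'f : d.contains k' = false := by simpa using hk'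
    have hck' : (d.insert k v).contains k' = false := by
      rw [PySem.Dict.contains_insert]; simp [hk'k, hk'f]
    rw [PySem.Dict.items_insert_of_not_contains _ w hck',
        PySem.Dict.items_insert_of_contains _ v hk,
        PySem.Dict.items_insert_of_contains _ v hck,
        PySem.Dict.items_insert_of_not_contains _ w hk'f,
        List.map_append]
    simp
    intro h; exact absurd h.symm hne

def pvStep2 (r : PySem.Dict String (PySem.Dict String Int)) (kv : (String × String) × Int) :
    PySem.Dict String (PySem.Dict String Int) :=
  let r' := if r.contains kv.1.1 then r else r.insert kv.1.1 PySem.Dict.empty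
  r'.insert kv.1.1 ((r'.getD kv.1.1 PySem.Dict.empty).insert kv.1.2 kv.2)

def pvW (d : PySem.Dict String (PySem.Dict String Int)) (cat st : String) (m : Int) :
    PySem.Dict String (PySem.Dict String Int) :=
  d.insert cat ((d.getD cat PySem.Dict.empty).insert st m)

lemma pvStep2_getD_self (r : PySem.Dict String (PySem.Dict String Int)) (kv : (String × String) × Int) :
    (pvStep2 r kv).getD kv.1.1 PySem.Dict.empty
      = (r.getD kv.1.1 PySem.Dict.empty).insert kv.1.2 kv.2 := by
  unfold pvStep2
  by_cases h : r.contains kv.1.1 = true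
  · simp [h, PySem.Dict.getD_insert_self]
  · have h' : r.contains kv.1.1 = false := by simpa using h
    simp [h', PySem.Dict.getD_insert_self, PySem.Dict.getD_of_not_contains _ _ h']

lemma pvStep2_getD_ne (r : PySem.Dict String (PySem.Dict String Int)) (kv : (String × String) × Int)
    (cat : String) (h : kv.1.1 ≠ cat) :
    (pvStep2 r kv).getD cat PySem.Dict.empty = r.getD cat PySem.Dict.empty := by
  unfold pvStep2
  by_cases hc : r.contains kv.1.1 = true
  · simp [hc, PySem.Dict.getD_insert_of_ne _ _ _ (Ne.symm h)]
  · simp [hc, PySem.Dict.getD_insert_of_ne _ _ _ (Ne.symm h)]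

lemma pvStep2_contains (r : PySem.Dict String (PySem.Dict String Int)) (kv : (String × String) × Int)
    (cat : String) (h : r.contains cat = true) :
    (pvStep2 r kv).contains cat = true := by
  unfold pvStep2
  by_cases hc : r.contains kv.1.1 = true <;>
    simp [hc, PySem.Dict.contains_insert, h]

lemma pvK (ls : List ((String × String) × Int)) (r₀ : PySem.Dict String (PySem.Dict String Int))
    (hn : (ls.map Prod.fst).Nodup) (cat st : String) :
    ((ls.foldl pvStep2 r₀).getD cat PySem.Dict.empty).get? st
      = (match ls.find? (fun kv => kv.1 == (cat, st)) with
         | some kv => some kv.2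
         | none => (r₀.getD cat PySem.Dict.empty).get? st) := by
  induction ls generalizing r₀ with
  | nil => simp
  | cons kv t ih =>
    simp only [List.map_cons, List.nodup_cons] at hn
    obtain ⟨hhd, htl⟩ := hn
    simp only [List.foldl_cons, List.find?_cons]
    by_cases hkv : (kv.1 == (cat, st)) = true
    · have hkv' : kv.1 = (cat, st) := by simpa using hkv
      have hft : t.find? (fun kv => kv.1 == (cat, st)) = none := by
        rw [List.find?_eq_none]
        intro x hx
        simp only [beq_iff_eq]
        intro hex
        exact hhd (by rw [hkv', ← hex]; exact List.mem_map_of_mem hx)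
      rw [ih _ htl, hft, hkv]
      have h1 : kv.1.1 = cat := by rw [hkv']
      have h2 : kv.1.2 = st := by rw [hkv']
      rw [← h1, ← h2, pvStep2_getD_self, PySem.Dict.get?_insert_self]
    · have hkv' : (kv.1 == (cat, st)) = false := by simpa using hkv
      have hbase : ((pvStep2 r₀ kv).getD cat PySem.Dict.empty).get? st
          = (r₀.getD cat PySem.Dict.empty).get? st := by
        by_cases h1 : kv.1.1 = cat
        · have h2 : kv.1.2 ≠ st := by
            intro h2
            apply hkv
            simp [← h1, ← h2]
          rw [← h1, pvStep2_getD_self, PySem.Dict.get?_insert_of_ne _ _ (Ne.symm h2), h1]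
        · rw [pvStep2_getD_ne _ _ _ h1]
      rw [ih _ htl, hkv']
      cases t.find? (fun kv => kv.1 == (cat, st)) <;> simp [hbase]

lemma pvStep2_eq_W (r : PySem.Dict String (PySem.Dict String Int)) (kv : (String × String) × Int) :
    pvStep2 r kv = pvW r kv.1.1 kv.1.2 kv.2 := by
  unfold pvStep2 pvW
  by_cases h : r.contains kv.1.1 = true
  · simp [h]
  · have h' : r.contains kv.1.1 = false := by simpa using h
    simp only [h', Bool.false_eq_true, if_false]
    rw [PySem.Dict.getD_insert_self, pv_insert_insert_self,
        PySem.Dict.getD_of_not_contains _ _ h']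

lemma pv_swap (r : PySem.Dict String (PySem.Dict String Int)) (cat st : String) (m : Int)
    (q : (String × String) × Int) (hq : q.1 ≠ (cat, st))
    (hc : r.contains cat = true) (hs : (r.getD cat PySem.Dict.empty).contains st = true) :
    pvStep2 (pvW r cat st m) q = pvW (pvStep2 r q) cat st m := by
  rw [pvStep2_eq_W, pvStep2_eq_W]
  by_cases h1 : q.1.1 = cat
  · have h2 : q.1.2 ≠ st := by
      intro h2; apply hq; rw [← h1, ← h2]
    unfold pvW
    rw [h1, PySem.Dict.getD_insert_self, PySem.Dict.getD_insert_self,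
        pv_insert_insert_self, pv_insert_insert_self,
        pv_insert_comm _ _ _ hs (Ne.symm h2)]
  · unfold pvW
    rw [PySem.Dict.getD_insert_of_ne _ _ _ h1, PySem.Dict.getD_insert_of_ne _ _ _ (Ne.symm h1),
        pv_insert_comm _ _ _ hc (Ne.symm h1)]

def pvStepA (d : PySem.Dict String (PySem.Dict String Int)) (p : String × String) :
    PySem.Dict String (PySem.Dict String Int) :=
  let d' := if d.get? p.1 = none then d.insert p.1 PySem.Dict.empty else d
  if (d'.getD p.1 PySem.Dict.empty).get? p.2 = none then
    d'.insert p.1 ((d'.getD p.1 PySem.Dict.empty).insert p.2 1)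
  else
    let a := ((d'.getD p.1 PySem.Dict.empty).get? p.2).getD 0
    d'.insert p.1 ((d'.getD p.1 PySem.Dict.empty).insert p.2 (a + 1))

def pvStepC (c : PySem.Dict (String × String) Int) (p : String × String) :
    PySem.Dict (String × String) Int :=
  c.insert p (c.getD p 0 + 1)

lemma pvC (t : List ((String × String) × Int)) (cat st : String) (m : Int)
    (r : PySem.Dict String (PySem.Dict String Int))
    (hc : r.contains cat = true) (hs : (r.getD cat PySem.Dict.empty).contains st = true)
    (ht : ∀ kv ∈ t, kv.1 ≠ (cat, st)) :
    t.foldl pvStep2 (pvW r cat st m) = pvW (t.foldl pvStep2 r) cat st m := by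
  induction t generalizing r with
  | nil => rfl
  | cons q t ih =>
    simp only [List.foldl_cons]
    rw [pv_swap r cat st m q (ht q (List.mem_cons_self)) hc hs]
    apply ih
    · exact pvStep2_contains r q cat hc
    · by_cases h1 : q.1.1 = cat
      · rw [← h1, pvStep2_getD_self, h1, PySem.Dict.contains_insert]
        simp [hs]
      · rw [pvStep2_getD_ne _ _ _ h1]; exact hs
    · intro kv hkv; exact ht kv (List.mem_cons_of_mem _ hkv)

lemma pvM (ls : List ((String × String) × Int)) (cat st : String) (m : Int)
    (r₀ : PySem.Dict String (PySem.Dict String Int))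
    (hn : (ls.map Prod.fst).Nodup) (hmem : (cat, st) ∈ ls.map Prod.fst) :
    (ls.map (fun q => if q.1 == (cat, st) then ((cat, st), m) else q)).foldl pvStep2 r₀
      = pvW (ls.foldl pvStep2 r₀) cat st m := by
  induction ls generalizing r₀ with
  | nil => simp at hmem
  | cons kv t ih =>
    simp only [List.map_cons, List.nodup_cons] at hn
    obtain ⟨hhd, htl⟩ := hn
    simp only [List.map_cons, List.foldl_cons]
    by_cases hkv : (kv.1 == (cat, st)) = true
    · have hkv' : kv.1 = (cat, st) := by simpa using hkv
      have ht : ∀ q ∈ t, q.1 ≠ (cat, st) := by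
        intro q hq he
        exact hhd (by rw [hkv', ← he]; exact List.mem_map_of_mem hq)
      have hmap : t.map (fun q => if q.1 == (cat, st) then ((cat, st), m) else q) = t := by
        calc t.map (fun q => if q.1 == (cat, st) then ((cat, st), m) else q)
            = t.map id := List.map_congr_left (fun q hq => by
                have := ht q hq; simp [this])
          _ = t := List.map_id _
      rw [if_pos hkv, hmap]
      have hkey : pvStep2 r₀ ((cat, st), m) = pvW (pvStep2 r₀ kv) cat st m := by
        rw [pvStep2_eq_W, pvStep2_eq_W, hkv']
        unfold pvW
        rw [PySem.Dict.getD_insert_self, pv_insert_insert_self, pv_insert_insert_self]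
      rw [hkey]
      apply pvC
      · rw [pvStep2_eq_W, hkv']; exact PySem.Dict.contains_insert_self _ _ _
      · have h11 : kv.1.1 = cat := by rw [hkv']
        have h12 : kv.1.2 = st := by rw [hkv']
        rw [← h11, pvStep2_getD_self, h12]
        exact PySem.Dict.contains_insert_self _ _ _
      · exact ht
    · have hmem' : (cat, st) ∈ t.map Prod.fst := by
        simp only [List.map_cons, List.mem_cons] at hmem
        rcases hmem with h | h
        · exact absurd (by simp [h]) hkv
        · exact h
      rw [if_neg (by simpa using hkv)]
      exact ih _ htl hmem'

lemma pv_nodup_foldC (ps : List (String × String)) (c : PySem.Dict (String × String) Int)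
    (h : c.keys.Nodup) : (ps.foldl pvStepC c).keys.Nodup := by
  induction ps generalizing c with
  | nil => exact h
  | cons p ps ih =>
    simp only [List.foldl_cons]
    exact ih _ (by unfold pvStepC; exact PySem.Dict.nodup_keys_insert _ _ _ h)

lemma pv_step (c : PySem.Dict (String × String) Int) (p : String × String) (h : c.keys.Nodup) :
    pvStepA (c.items.foldl pvStep2 PySem.Dict.empty) p
      = (pvStepC c p).items.foldl pvStep2 PySem.Dict.empty := by
  have hn : (c.items.map Prod.fst).Nodup := h
  have hK := pvK c.items PySem.Dict.empty hn p.1 p.2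
  simp only [PySem.Dict.getD_empty, PySem.Dict.get?_empty] at hK
  by_cases hp : c.contains p = true
  · obtain ⟨n, hn2⟩ : ∃ n, c.get? p = some n := by
      rw [PySem.Dict.contains_eq_isSome_get?] at hp
      exact Option.isSome_iff_exists.mp hp
    obtain ⟨kv, hf, hkv2⟩ : ∃ kv, c.items.find? (fun q => q.1 == p) = some kv ∧ kv.2 = n := by
      have := hn2
      unfold PySem.Dict.get? at this
      rcases Option.map_eq_some_iff.mp this with ⟨kv, hkv, hv⟩
      exact ⟨kv, hkv, hv⟩
    have hKs : ((c.items.foldl pvStep2 PySem.Dict.empty).getD p.1 PySem.Dict.empty).get? p.2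
        = some n := by
      rw [hK]
      simp only [Prod.mk.eta]
      rw [hf]
      simpa using hkv2
    have hgnone : ¬ (c.items.foldl pvStep2 PySem.Dict.empty).get? p.1 = none := by
      intro h0
      rw [PySem.Dict.getD_eq_get?_getD, h0] at hKs
      simp at hKs
    have hgd : c.getD p 0 = n := PySem.Dict.getD_of_get?_eq_some _ _ hn2
    have hmem : (p.1, p.2) ∈ c.items.map Prod.fst := by
      simp only [Prod.mk.eta]
      exact (PySem.Dict.contains_iff_mem_keys c p).mp hp
    simp only [pvStepA, pvStepC]
    rw [if_neg hgnone, if_neg (by rw [hKs]; simp), hKs]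
    rw [PySem.Dict.items_insert_of_contains _ _ hp, hgd]
    have := pvM c.items p.1 p.2 (n + 1) PySem.Dict.empty hn hmem
    simp only [Prod.mk.eta] at this
    rw [this]
    rfl
  · have hp' : c.contains p = false := by simpa using hp
    have hall : ∀ x ∈ c.items, ¬ (x.1 == p) = true := by
      simpa [PySem.Dict.contains, List.any_eq_false] using hp'
    have hfnone : c.items.find? (fun q => q.1 == p) = none := List.find?_eq_none.mpr hall
    have hKn : ((c.items.foldl pvStep2 PySem.Dict.empty).getD p.1 PySem.Dict.empty).get? p.2
        = none := by
      rw [hK]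
      simp only [Prod.mk.eta]
      rw [hfnone]
    simp only [pvStepA, pvStepC]
    rw [PySem.Dict.getD_of_not_contains _ _ hp', PySem.Dict.items_insert_of_not_contains _ _ hp',
        List.foldl_append]
    simp only [List.foldl_cons, List.foldl_nil]
    rw [pvStep2_eq_W]
    by_cases hg : (c.items.foldl pvStep2 PySem.Dict.empty).get? p.1 = none
    · rw [if_pos hg]
      rw [if_pos (by rw [PySem.Dict.getD_insert_self]; exact PySem.Dict.get?_empty _)]
      rw [PySem.Dict.getD_insert_self, pv_insert_insert_self]
      unfold pvW
      rw [PySem.Dict.getD_eq_get?_getD, hg]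
      norm_num
    · rw [if_neg hg, if_pos hKn]
      unfold pvW
      norm_num

lemma pv_main (ps : List (String × String)) :
    ps.foldl pvStepA PySem.Dict.empty
      = ((ps.foldl pvStepC PySem.Dict.empty).items.foldl pvStep2 PySem.Dict.empty) := by
  induction ps using List.reverseRecOn with
  | nil => rfl
  | append_singleton qs p ih =>
    rw [List.foldl_append, List.foldl_append]
    simp only [List.foldl_cons, List.foldl_nil]
    rw [ih, pv_step _ p (pv_nodup_foldC qs PySem.Dict.empty PySem.Dict.nodup_keys_empty)]

-- ===== VERDICT (by name: the statement is the Claim_ definition above) =====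
theorem get_aggregated_global_category_count_dict_spec : Claim_equal_get_aggregated_global_category_count_dict := by
  intro l _ _
  unfold Spec_get_aggregated_global_category_count_dict
  unfold get_aggregated_global_category_count_dict get_aggregated_global_category_count_dict_alt
  have hA : l.foldl (fun d line =>
      let category := PySem.List.pyGetD ((PySem.Str.split? line ",").getD []) 3 ""
      let status_check := PySem.List.pyGetD ((PySem.Str.split? line ",").getD []) 4 ""
      let d := if d.get? category = none then d.insert category PySem.Dict.empty else d
      if (d.getD category PySem.Dict.empty).get? status_check = none then
        d.insert category ((d.getD category PySem.Dict.empty).insert status_check 1)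
      else
        let a := ((d.getD category PySem.Dict.empty).get? status_check).getD 0
        d.insert category ((d.getD category PySem.Dict.empty).insert status_check (a + 1)))
      PySem.Dict.empty = (l.map pvPairOf).foldl pvStepA PySem.Dict.empty := by
    rw [List.foldl_map]; rfl
  have hC : l.foldl (fun c line =>
      let fields := (PySem.Str.split? line ",").getD []
      let key := (PySem.List.pyGetD fields 3 "", PySem.List.pyGetD fields 4 "")
      c.insert key (c.getD key 0 + 1)) PySem.Dict.empty
      = (l.map pvPairOf).foldl pvStepC PySem.Dict.empty := by
    rw [List.foldl_map]; rfl
  rw [hA, hC, pv_main]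
  rfl
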